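-- pv_equiv track=rewrite | github.com/Oh-SeulGi0615/Algorithm-Study | 프로그래머스/lv0/120843. 공 던지기/공 던지기.py | solution
-- ===== SOURCE A (Python) =====
-- def solution(numbers, k):
--     i = 0
--     answer = 0
--     while True:
--         if k == 0:
--             break
--
--         if i % 2 == 0:
--             answer = numbers[0]
--             i += 1
--             k -= 1
--         else:
--             i += 1
--
--         numbers.append(numbers[0])
--         numbers.pop(0)
--     return answer
-- ===== SOURCE B (Python) =====
-- def solution(numbers, k):
--     if k == 0:
--         return 0
--     return numbers[2 * (k - 1) % len(numbers)]
-- ===== Notes on version B (the rewrite author's own statement) =====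
-- stated objective: faster
-- what changed: Replaces the O(k*n) rotation simulation (append+pop per step) with a closed-form O(1) index lookup numbers[2*(k-1) % len(numbers)].
import Mathlib
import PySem

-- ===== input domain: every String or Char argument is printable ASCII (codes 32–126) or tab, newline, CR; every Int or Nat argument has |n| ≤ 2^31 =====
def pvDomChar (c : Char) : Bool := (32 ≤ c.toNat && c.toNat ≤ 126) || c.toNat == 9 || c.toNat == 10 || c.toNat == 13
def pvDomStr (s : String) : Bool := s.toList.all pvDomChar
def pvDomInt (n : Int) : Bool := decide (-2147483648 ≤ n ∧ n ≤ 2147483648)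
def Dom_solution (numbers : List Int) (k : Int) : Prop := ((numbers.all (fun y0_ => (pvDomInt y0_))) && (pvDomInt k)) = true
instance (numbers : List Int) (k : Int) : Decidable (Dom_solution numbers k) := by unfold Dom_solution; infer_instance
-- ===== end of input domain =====

-- B replaces A's O(k*n) rotation simulation by a closed-form O(1) index lookup.
-- Note: A mutates its list argument in place (rotates it); the equivalence proved here is about the RETURN value only.

-- ===== PORT A =====
-- the while-True loop; fuel only makes the recursion total (2*k.toNat+1 suffices for k ≥ 0;
-- for k < 0 the Python loop never terminates, excluded by Pre_)
def solutionLoopA (numbers : List Int) (i k answer : Int) : Nat → Int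
  | 0 => answer
  | fuel + 1 =>
    if k = 0 then answer
    else
      match PySem.List.pyGet? numbers 0 with
      | none => answer  -- numbers[0] raises IndexError on []; excluded by Pre_
      | some h =>
        if PySem.Int.mod i 2 = 0 then
          solutionLoopA ((numbers ++ [h]).drop 1) (i + 1) (k - 1) h fuel
        else
          solutionLoopA ((numbers ++ [h]).drop 1) (i + 1) k answer fuel

def solution (numbers : List Int) (k : Int) : Int :=
  solutionLoopA numbers 0 k 0 (2 * k.toNat + 1)

-- ===== PORT B =====
def solution_alt (numbers : List Int) (k : Int) : Int :=
  if k = 0 then 0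
  else
    match PySem.List.pyGet? numbers (PySem.Int.mod (2 * (k - 1)) numbers.length) with
    | some v => v
    | none => 0  -- % len raises ZeroDivisionError on []; excluded by Pre_

-- ===== PRECONDITION & SPEC =====
-- Pre_ excludes k < 0 (A's while loop never terminates there) and k > 0 with an empty
-- list (numbers[0] raises IndexError); it admits every input on which A returns.
def Pre_solution (numbers : List Int) (k : Int) : Prop := 0 ≤ k ∧ (k = 0 ∨ numbers ≠ [])
instance (numbers : List Int) (k : Int) : Decidable (Pre_solution numbers k) := by
  unfold Pre_solution; infer_instance

def pvWitness_solution : List Int × Int := ([1, 2, 3, 4], 2)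

def Spec_solution (numbers : List Int) (k : Int) (out : Int) : Prop := out = solution_alt numbers k
instance (numbers : List Int) (k : Int) (out : Int) : Decidable (Spec_solution numbers k out) := by unfold Spec_solution; infer_instance

-- ===== CLAIM (what is proved, stated in full; the proofs are below) =====
def Claim_equal_solution : Prop := ∀ (numbers : List Int) (k : Int), Dom_solution numbers k → Pre_solution numbers k → Spec_solution numbers k (solution numbers k)

-- ===== LEMMAS AND PROOFS =====

theorem loopA_k_zero (l : List Int) (i a : Int) (f : Nat) :
    solutionLoopA l i 0 a f = a := by
  cases f <;> simp [solutionLoopA]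

theorem rot_step (x : Int) (xs : List Int) :
    ((x :: xs) ++ [x]).drop 1 = (x :: xs).rotate 1 := by
  simp [List.rotate_cons_succ]

-- main loop invariant: with k = m+1 > 0, an even i and enough fuel, the loop
-- returns the head of the list rotated 2*m times
theorem loopA_eq_rotate (m : Nat) : ∀ (l : List Int) (i a : Int) (fuel : Nat),
    l ≠ [] → PySem.Int.mod i 2 = 0 → 2 * m + 1 ≤ fuel →
    solutionLoopA l i ((m : Int) + 1) a fuel = (l.rotate (2 * m)).headI := by
  induction m with
  | zero =>
    intro l i a fuel hl hi hf
    obtain ⟨x, xs, rfl⟩ := List.exists_cons_of_ne_nil hl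
    obtain ⟨f, rfl⟩ : ∃ f, fuel = f + 1 := ⟨fuel - 1, by omega⟩
    have hi2 : i % 2 = 0 := by
      rwa [PySem.Int.mod_eq_emod_of_pos (by norm_num)] at hi
    simp [solutionLoopA, loopA_k_zero, hi2]
  | succ m ih =>
    intro l i a fuel hl hi hf
    obtain ⟨x, xs, rfl⟩ := List.exists_cons_of_ne_nil hl
    obtain ⟨f, rfl⟩ : ∃ f, fuel = f + 2 := ⟨fuel - 2, by omega⟩
    have hcast : ((m + 1 : Nat) : Int) + 1 = (m : Int) + 1 + 1 := by push_cast; ring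
    rw [hcast]
    have hi2 : i % 2 = 0 := by
      rwa [PySem.Int.mod_eq_emod_of_pos (by norm_num)] at hi
    have hi1 : ¬ PySem.Int.mod (i + 1) 2 = 0 := by
      rw [PySem.Int.mod_eq_emod_of_pos (by norm_num)]; omega
    have hk1 : ¬ ((m : Int) + 1 + 1 = 0) := by omega
    have hk2 : ¬ ((m : Int) + 1 + 1 - 1 = 0) := by omega
    have hrot1 : (x :: xs).rotate 1 ≠ [] := by
      simp
    obtain ⟨y, ys, hy⟩ := List.exists_cons_of_ne_nil hrot1
    have step1 : solutionLoopA (x :: xs) i ((m : Int) + 1 + 1) a (f + 2)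
        = solutionLoopA ((x :: xs).rotate 1) (i + 1) ((m : Int) + 1) x (f + 1) := by
      simp only [solutionLoopA, hk1, if_false, PySem.List.pyGet?_zero_cons, hi, if_true, rot_step]
      norm_num
    have step2 : solutionLoopA ((x :: xs).rotate 1) (i + 1) ((m : Int) + 1) x (f + 1)
        = solutionLoopA (((x :: xs).rotate 1).rotate 1) (i + 2) ((m : Int) + 1) x f := by
      rw [hy]
      simp only [solutionLoopA, PySem.List.pyGet?_zero_cons, hi1, if_false]
      have : ¬ ((m : Int) + 1 = 0) := by omega
      simp only [this, if_false, rot_step]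
      ring_nf
    have hmod2 : PySem.Int.mod (i + 2) 2 = 0 := by
      rw [PySem.Int.mod_eq_emod_of_pos (by norm_num)]; omega
    have hrot2 : ((x :: xs).rotate 1).rotate 1 ≠ [] := by
      simp [List.rotate_eq_nil_iff]
    have hfuel : 2 * m + 1 ≤ f := by omega
    rw [step1, step2, ih _ _ _ _ hrot2 hmod2 hfuel]
    have harg : 2 * (m + 1) = 1 + (1 + 2 * m) := by ring
    rw [List.rotate_rotate, List.rotate_rotate, harg]

theorem headI_rotate (l : List Int) (j : Nat) (hl : l ≠ []) :
    (l.rotate j).headI = l[j % l.length]'(Nat.mod_lt _ (List.length_pos_of_ne_nil hl)) := by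
  have h0 : 0 < (l.rotate j).length := by
    simpa [List.length_rotate] using List.length_pos_of_ne_nil hl
  have h := List.getElem_rotate l j 0 h0
  simp only [Nat.zero_add] at h
  rw [← h]
  obtain ⟨y, ys, hy⟩ := List.exists_cons_of_ne_nil (List.ne_nil_of_length_pos h0)
  simp [hy]

-- ===== VERDICT (by name: the statement is the Claim_ definition above) =====
theorem solution_spec : Claim_equal_solution := by
  intro numbers k _ ⟨hk, hnil⟩
  unfold Spec_solution solution solution_alt
  rcases eq_or_lt_of_le hk with h0 | hpos
  · simp [← h0, loopA_k_zero]
  · have hne : numbers ≠ [] := by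
      rcases hnil with h | h
      · omega
      · exact h
    have hn : 0 < numbers.length := List.length_pos_of_ne_nil hne
    obtain ⟨m, hm⟩ : ∃ m : Nat, k = (m : Int) + 1 := ⟨(k - 1).toNat, by omega⟩
    subst hm
    have hknz : ¬ ((m : Int) + 1 = 0) := by omega
    rw [loopA_eq_rotate m numbers 0 0 _ hne (by decide) (by omega),
      headI_rotate _ _ hne]
    have hidx : PySem.Int.mod (2 * ((m : Int) + 1 - 1)) numbers.length
        = ((2 * m % numbers.length : Nat) : Int) := by
      have : 2 * ((m : Int) + 1 - 1) = ((2 * m : Nat) : Int) := by push_cast; ring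
      rw [this, PySem.Int.mod_natCast]
    rw [if_neg hknz, hidx, PySem.List.pyGet?_natCast]
    rw [List.getElem?_eq_getElem (Nat.mod_lt _ hn)]
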